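-- pv_equiv track=rewrite | github.com/fylmr/CryptoCross | utilities.py | find_max_space_h
-- ===== SOURCE A (Python) =====
-- def find_max_space_h(grid):
--     res = 0
--
--     for line in grid:
--         count = 0
--         for i in line:
--             if count > res:
--                 res = count
--             if i != '_':
--                 count = 0
--             else:
--                 count += 1
--         if count > res:
--             res = count
--
--     return res
-- ===== SOURCE B (Python) =====
-- from itertools import groupby
--
-- def find_max_space_h(grid):
--     lengths = [len(list(g)) for row in grid for k, g in groupby(row) if k == '_']
--     return max(lengths, default=0)
-- ===== Notes on version B (the rewrite author's own statement) =====
-- stated objective: simpler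
-- what changed: Replaces the per-character running counter with reset (nested loops with two mutable variables) by a runs decomposition: groupby splits each row into maximal runs, and the answer is the max length of an underscore run, default 0.
import Mathlib
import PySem

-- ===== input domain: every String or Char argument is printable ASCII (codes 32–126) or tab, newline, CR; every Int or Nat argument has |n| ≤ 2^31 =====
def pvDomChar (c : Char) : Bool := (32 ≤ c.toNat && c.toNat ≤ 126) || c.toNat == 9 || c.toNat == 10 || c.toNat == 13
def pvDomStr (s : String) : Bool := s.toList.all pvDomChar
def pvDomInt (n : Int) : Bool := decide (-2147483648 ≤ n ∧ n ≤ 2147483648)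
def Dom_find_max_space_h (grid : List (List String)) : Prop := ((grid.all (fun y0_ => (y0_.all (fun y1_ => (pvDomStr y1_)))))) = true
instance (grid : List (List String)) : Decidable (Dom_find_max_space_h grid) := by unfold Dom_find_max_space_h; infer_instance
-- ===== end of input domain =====

-- B replaces A's per-character running counter with a groupby-style runs decomposition (objective: simpler).


-- ===== PORT A =====
def find_max_space_h (grid : List (List String)) : Int :=
  grid.foldl (fun res line =>
    let p := line.foldl (fun (st : Int × Int) i =>
      let res' := if st.1 > st.2 then st.1 else st.2
      let count' := if i ≠ "_" then 0 else st.1 + 1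
      (count', res')) ((0 : Int), res)
    if p.1 > p.2 then p.1 else p.2) 0

-- ===== PORT B =====
-- itertools.groupby as maximal runs (key, run length); current run key k with length n so far
def pvRunsAux (k : String) (n : Int) : List String → List (String × Int)
  | [] => [(k, n)]
  | x :: xs => if x = k then pvRunsAux k (n + 1) xs else (k, n) :: pvRunsAux x 1 xs

def pvGroupRuns : List String → List (String × Int)
  | [] => []
  | x :: xs => pvRunsAux x 1 xs

def find_max_space_h_alt (grid : List (List String)) : Int :=
  let lengths := grid.flatMap (fun row =>
    (pvGroupRuns row).filterMap (fun kn => if kn.1 = "_" then some kn.2 else none))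
  match PySem.List.max? lengths (fun y => y) with
  | none => 0
  | some m => m

-- ===== PRECONDITION & SPEC =====
def Spec_find_max_space_h (grid : List (List String)) (out : Int) : Prop := out = find_max_space_h_alt grid
instance (grid : List (List String)) (out : Int) : Decidable (Spec_find_max_space_h grid out) := by unfold Spec_find_max_space_h; infer_instance

-- ===== CLAIM (what is proved, stated in full; the proofs are below) =====
def Claim_equal_find_max_space_h : Prop := ∀ (grid : List (List String)), Dom_find_max_space_h grid → Spec_find_max_space_h grid (find_max_space_h grid)

-- ===== LEMMAS AND PROOFS =====

-- proof-only abbreviations for A's inner-loop step and final max-check (defeq to the port's lambdas)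
def pvStep (st : Int × Int) (i : String) : Int × Int :=
  (if i ≠ "_" then 0 else st.1 + 1, if st.1 > st.2 then st.1 else st.2)

def pvFin (p : Int × Int) : Int := if p.1 > p.2 then p.1 else p.2

def pvFilt (kn : String × Int) : Option Int := if kn.1 = "_" then some kn.2 else none

-- the maximum value attained by A's counter over a row, starting from counter value c
def pvCountsMax (c : Int) : List String → Int
  | [] => c
  | x :: xs => max c (pvCountsMax (if x = "_" then c + 1 else 0) xs)

theorem pvCountsMax_ge (c : Int) (xs : List String) : c ≤ pvCountsMax c xs := by
  induction xs generalizing c with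
  | nil => simp [pvCountsMax]
  | cons x t ih => simp [pvCountsMax]

theorem pvCountsMax_nonneg (c : Int) (xs : List String) (h : 0 ≤ c) : 0 ≤ pvCountsMax c xs :=
  le_trans h (pvCountsMax_ge c xs)

theorem pvStep_eq (c r : Int) (x : String) :
    pvStep (c, r) x = ((if x = "_" then c + 1 else 0), max r c) := by
  by_cases hx : x = "_" <;> simp [pvStep, hx, Prod.ext_iff, max_def] <;> split_ifs <;> omega

-- A's inner loop over a row computes max r (pvCountsMax c line)
theorem A_row (line : List String) (c r : Int) :
    pvFin (line.foldl pvStep (c, r)) = max r (pvCountsMax c line) := by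
  induction line generalizing c r with
  | nil =>
    simp only [List.foldl_nil, pvFin, pvCountsMax, max_def]
    split_ifs <;> omega
  | cons x t ih =>
    rw [List.foldl_cons, pvStep_eq, ih]
    simp [pvCountsMax]

theorem filt_cons_pos (n : Int) (t : List (String × Int)) :
    List.filterMap pvFilt (("_", n) :: t) = n :: List.filterMap pvFilt t := by
  simp [pvFilt]

theorem filt_cons_neg (k : String) (n : Int) (t : List (String × Int)) (h : ¬ k = "_") :
    List.filterMap pvFilt ((k, n) :: t) = List.filterMap pvFilt t := by
  simp [pvFilt, h]

-- folding max over the filtered runs of the current state equals the counter maximum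
theorem runsAux_max (xs : List String) (k : String) (n acc : Int) (hacc : 0 ≤ acc) (hn : 1 ≤ n) :
    ((pvRunsAux k n xs).filterMap pvFilt).foldl max acc
      = max acc (pvCountsMax (if k = "_" then n else 0) xs) := by
  induction xs generalizing k n acc with
  | nil =>
    by_cases hk : k = "_"
    · rw [pvRunsAux, hk, filt_cons_pos]
      simp [pvCountsMax]
    · rw [pvRunsAux, filt_cons_neg k n [] hk]
      simp [pvCountsMax, hk] <;> omega
  | cons x t ih =>
    by_cases hx : x = k
    · rw [pvRunsAux, if_pos hx, ih k (n + 1) acc hacc (by omega)]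
      subst hx
      by_cases hk : x = "_"
      · have := pvCountsMax_ge (n + 1) t
        simp [pvCountsMax, hk] <;> omega
      · have := pvCountsMax_nonneg 0 t le_rfl
        simp [pvCountsMax, hk] <;> omega
    · rw [pvRunsAux, if_neg hx]
      by_cases hk : k = "_"
      · have hxne : ¬ x = "_" := by rw [hk] at hx; exact hx
        rw [hk, filt_cons_pos, List.foldl_cons, ih x 1 (max acc n) (by omega) le_rfl]
        have := pvCountsMax_nonneg 0 t le_rfl
        simp [pvCountsMax, hxne] <;> omega
      · rw [filt_cons_neg k n _ hk, ih x 1 acc hacc le_rfl]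
        by_cases hxu : x = "_"
        · have := pvCountsMax_ge (0 + 1) t
          simp [pvCountsMax, hk, hxu] <;> omega
        · have := pvCountsMax_nonneg 0 t le_rfl
          simp [pvCountsMax, hk, hxu] <;> omega

theorem row_max (row : List String) (acc : Int) (hacc : 0 ≤ acc) :
    ((pvGroupRuns row).filterMap pvFilt).foldl max acc = max acc (pvCountsMax 0 row) := by
  cases row with
  | nil => simp [pvGroupRuns, pvCountsMax] <;> omega
  | cons x t =>
    rw [show pvGroupRuns (x :: t) = pvRunsAux x 1 t from rfl,
        runsAux_max t x 1 acc hacc le_rfl]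
    by_cases hx : x = "_"
    · have := pvCountsMax_ge (0 + 1) t
      simp [pvCountsMax, hx] <;> omega
    · have := pvCountsMax_nonneg 0 t le_rfl
      simp [pvCountsMax, hx] <;> omega

theorem flat_max (grid : List (List String)) (acc : Int) (hacc : 0 ≤ acc) :
    ((grid.flatMap (fun row => (pvGroupRuns row).filterMap pvFilt)).foldl max acc)
      = grid.foldl (fun r row => max r (pvCountsMax 0 row)) acc := by
  induction grid generalizing acc with
  | nil => simp
  | cons g t ih =>
    rw [List.flatMap_cons, List.foldl_append, List.foldl_cons,
        row_max g acc hacc, ih (max acc (pvCountsMax 0 g)) (le_trans hacc (le_max_left _ _))]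

-- max(lengths, default=0) as the running max from 0, given every length is positive
theorem maxD_eq_foldl (xs : List Int) (hpos : ∀ a ∈ xs, 1 ≤ a) :
    (match PySem.List.max? xs (fun y => y) with
      | none => 0
      | some m => m) = xs.foldl max 0 := by
  cases xs with
  | nil => simp [PySem.List.max?]
  | cons x t =>
    rw [PySem.List.max?_id_cons]
    have hx : 1 ≤ x := hpos x (by simp)
    rw [List.foldl_cons, show max (0 : Int) x = x from by omega]

theorem lengths_pos (grid : List (List String)) :
    ∀ a ∈ grid.flatMap (fun row => (pvGroupRuns row).filterMap pvFilt), 1 ≤ a := by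
  intro a ha
  simp only [List.mem_flatMap, List.mem_filterMap] at ha
  obtain ⟨row, _, kn, hmem, hf⟩ := ha
  have key : ∀ (xs : List String) (k : String) (n : Int), 1 ≤ n →
      kn ∈ pvRunsAux k n xs → 1 ≤ kn.2 := by
    intro xs
    induction xs with
    | nil =>
      intro k n hn hm
      simp [pvRunsAux] at hm
      subst hm; simpa
    | cons x t ih =>
      intro k n hn hm
      rw [pvRunsAux] at hm
      by_cases hx : x = k
      · rw [if_pos hx] at hm
        exact ih k (n + 1) (by omega) hm
      · rw [if_neg hx] at hm
        rcases List.mem_cons.mp hm with h | h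
        · subst h; simpa
        · exact ih x 1 le_rfl h
  cases row with
  | nil => simp [pvGroupRuns] at hmem
  | cons x t =>
    have h2 := key t x 1 le_rfl hmem
    simp only [pvFilt] at hf
    by_cases hk : kn.1 = "_"
    · rw [if_pos hk] at hf
      cases hf; exact h2
    · simp [hk] at hf

-- ===== VERDICT (by name: the statement is the Claim_ definition above) =====
theorem find_max_space_h_spec : Claim_equal_find_max_space_h := by
  intro grid _
  show List.foldl (fun res line => pvFin (List.foldl pvStep ((0 : Int), res) line)) 0 grid
      = match PySem.List.max? (grid.flatMap fun row => (pvGroupRuns row).filterMap pvFilt)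
          (fun y => y) with
        | none => 0
        | some m => m
  rw [maxD_eq_foldl _ (lengths_pos grid), flat_max grid 0 le_rfl,
      show (fun (res : Int) (line : List String) => pvFin (List.foldl pvStep (0, res) line))
        = fun r row => max r (pvCountsMax 0 row)
      from funext fun res => funext fun line => A_row line 0 res]
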